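-- pv_equiv track=rewrite | github.com/unifyai/unity | unity/actor/environments/base.py | resolve_directly_callable
-- ===== SOURCE A (Python) =====
-- from typing import Any, Dict, List, Literal, Optional, Set
--
-- def matches_segment(pattern: str, canonical_name: str) -> bool:
--     """Check if *pattern* matches *canonical_name* using dotted-segment rules.
--
--     A pattern matches a canonical name if it is either an exact match or a
--     dotted ancestor (i.e., a complete prefix up to a ``.`` boundary).
--
--     Examples::
--
--         matches_segment("primitives", "primitives.contacts.ask")      # True
--         matches_segment("primitives.contacts", "primitives.contacts.ask")  # True
--         matches_segment("primitives.contacts.ask", "primitives.contacts.ask")  # True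
--         matches_segment("primitives.con", "primitives.contacts.ask")   # False
--         matches_segment("functions", "functions.alpha")                 # True
--         matches_segment("functions.alpha", "functions.alpha")           # True
--     """
--     return canonical_name == pattern or canonical_name.startswith(pattern + ".")
--
-- def resolve_directly_callable(
--     patterns: List[str],
--     all_tool_names: Set[str],
-- ) -> Set[str]:
--     """Expand a list of dotted-segment patterns into matching canonical tool names.
--
--     Args:
--         patterns: List of patterns (e.g., ``["primitives.contacts", "alpha"]``).
--         all_tool_names: Complete set of canonical tool names across all environments.
--
--     Returns:
--         Set of canonical tool names matched by the patterns.
--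
--     Raises:
--         ValueError: If any pattern matches zero tool names (likely a typo or
--             a function the agent hasn't encountered).
--     """
--     matched: Set[str] = set()
--     for pat in patterns:
--         hits = {name for name in all_tool_names if matches_segment(pat, name)}
--         if not hits:
--             raise ValueError(
--                 f"environment pattern {pat!r} did not match any known "
--                 f"tool. Available tools: {sorted(all_tool_names)}",
--             )
--         matched |= hits
--     return matched
-- ===== SOURCE B (Python) =====
-- from typing import List, Set
--
--
-- def resolve_directly_callable(
--     patterns: List[str],
--     all_tool_names: Set[str],
-- ) -> Set[str]:
--     # One pass over the tool names builds a prefix -> [names] index keyed by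
--     # every dotted ancestor of each name (and the name itself); each pattern
--     # is then resolved by a single dict lookup instead of scanning all names.
--     index = {}
--     for name in all_tool_names:
--         for i, ch in enumerate(name):
--             if ch == ".":
--                 index.setdefault(name[:i], []).append(name)
--         index.setdefault(name, []).append(name)
--     matched: Set[str] = set()
--     for pat in patterns:
--         hits = index.get(pat)
--         if hits is None:
--             raise ValueError(
--                 f"environment pattern {pat!r} did not match any known "
--                 f"tool. Available tools: {sorted(all_tool_names)}",
--             )
--         matched.update(hits)
--     return matched
-- ===== Notes on version B (the rewrite author's own statement) =====
-- stated objective: alternative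
-- what changed: Replaces the per-pattern scan over all tool names with a dict built in one pass (every dotted ancestor prefix of each name maps to its matching names), so each pattern is resolved by a single dict lookup; intended as faster (measured ~1.6x median at the largest size, not consistently >=1.5x).
import Mathlib
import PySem

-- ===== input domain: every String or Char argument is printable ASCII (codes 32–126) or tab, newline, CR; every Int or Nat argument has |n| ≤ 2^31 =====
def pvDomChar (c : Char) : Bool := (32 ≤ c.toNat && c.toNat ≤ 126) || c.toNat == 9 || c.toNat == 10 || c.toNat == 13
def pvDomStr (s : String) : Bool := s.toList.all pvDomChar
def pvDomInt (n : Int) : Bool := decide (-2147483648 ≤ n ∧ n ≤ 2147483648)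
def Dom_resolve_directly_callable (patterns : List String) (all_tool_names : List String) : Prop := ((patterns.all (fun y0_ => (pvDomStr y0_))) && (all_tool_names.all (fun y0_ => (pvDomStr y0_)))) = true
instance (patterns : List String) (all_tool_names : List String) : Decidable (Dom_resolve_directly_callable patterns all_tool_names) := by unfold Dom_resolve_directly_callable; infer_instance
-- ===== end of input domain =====

-- B replaces A's per-pattern scan over all tool names by a dict from every dotted ancestor
-- prefix of each name to its matching names, built in one pass, so each pattern is one lookup
-- (an alternative algorithm; the equivalence is about the returned set, A mutates nothing).

-- ===== PORT A =====
def matches_segment (pattern : String) (canonical_name : String) : Bool :=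
  canonical_name == pattern
    || PySem.Chars.startswith canonical_name.toList (pattern.toList ++ ['.'])

def resolve_directly_callable (patterns : List String) (all_tool_names : List String) : List String :=
  -- matched = set(); for pat: hits = {name for name in all_tool_names if matches_segment(pat, name)};
  -- if not hits: raise ValueError (modelled as the Option accumulator becoming none); matched |= hits
  (patterns.foldl
    (fun acc pat =>
      match acc with
      | none => none
      | some matched =>
        let hits : PySem.Set String :=
          PySem.Set.ofList (all_tool_names.filter (fun name => matches_segment pat name))
        if hits = [] then none
        else some (PySem.Set.union matched hits))
    (some (PySem.Set.empty : PySem.Set String))).getD []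

-- ===== PORT B =====
-- the ancestor keys of one name: name[:i] for every i with name[i] == '.', then name itself
def pvDottedKeys (name : String) : List String :=
  ((PySem.List.enumerate name.toList).filter (fun ic => ic.2 == '.')).map
    (fun ic => PySem.Str.slice name none (some ic.1)) ++ [name]

def pvBuildIndex (all_tool_names : List String) : PySem.Dict String (List String) :=
  all_tool_names.foldl
    (fun d name =>
      (pvDottedKeys name).foldl (fun d k => d.modify k [] (fun v => v ++ [name])) d)
    PySem.Dict.empty

def resolve_directly_callable_alt (patterns : List String) (all_tool_names : List String) : List String :=
  let idx := pvBuildIndex all_tool_names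
  (patterns.foldl
    (fun acc pat =>
      match acc with
      | none => none
      | some matched =>
        match idx.get? pat with
        | none => none        -- hits is None: raise ValueError
        | some hits => some (PySem.Set.update matched hits))
    (some (PySem.Set.empty : PySem.Set String))).getD []

-- ===== PRECONDITION & SPEC =====
-- Pre_ excludes exactly the inputs on which A raises ValueError (some pattern matching no
-- tool name); the Nodup conjunct only states the type convention: all_tool_names is a
-- Python set, so its List holds distinct elements.
def Pre_resolve_directly_callable (patterns : List String) (all_tool_names : List String) : Prop :=
  all_tool_names.Nodup ∧
    ∀ pat ∈ patterns, ∃ name ∈ all_tool_names, matches_segment pat name = true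
instance (patterns : List String) (all_tool_names : List String) : Decidable (Pre_resolve_directly_callable patterns all_tool_names) := by unfold Pre_resolve_directly_callable; infer_instance

def pvWitness_resolve_directly_callable : List String × List String :=
  (["primitives", "primitives.contacts.ask"], ["primitives.contacts.ask", "functions.alpha"])

def Spec_resolve_directly_callable (patterns : List String) (all_tool_names : List String) (out : List String) : Prop := out = resolve_directly_callable_alt patterns all_tool_names
instance (patterns : List String) (all_tool_names : List String) (out : List String) : Decidable (Spec_resolve_directly_callable patterns all_tool_names out) := by unfold Spec_resolve_directly_callable; infer_instance

-- ===== CLAIM (what is proved, stated in full; the proofs are below) =====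
def Claim_equal_resolve_directly_callable : Prop := ∀ (patterns : List String) (all_tool_names : List String), Dom_resolve_directly_callable patterns all_tool_names → Pre_resolve_directly_callable patterns all_tool_names → Spec_resolve_directly_callable patterns all_tool_names (resolve_directly_callable patterns all_tool_names)

-- ===== LEMMAS AND PROOFS =====

-- membership in the ancestor-key list is exactly A's dotted-segment match
theorem slice_toList_take (name : String) (k : Nat) :
    (PySem.Str.slice name none (some (k : Int))).toList = name.toList.take k := by
  rw [PySem.Str.toList_slice, PySem.Chars.slice_eq_listSlice, PySem.List.slice_to_natCast]

theorem mem_pvDottedKeys (pat name : String) :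
    pat ∈ pvDottedKeys name ↔ matches_segment pat name = true := by
  unfold pvDottedKeys matches_segment
  rw [List.mem_append, List.mem_singleton, Bool.or_eq_true, beq_iff_eq,
    PySem.Chars.startswith_iff]
  have key : pat ∈ ((PySem.List.enumerate name.toList).filter (fun ic => ic.2 == '.')).map
      (fun ic => PySem.Str.slice name none (some ic.1)) ↔
      pat.toList ++ ['.'] <+: name.toList := by
    constructor
    · rintro hm
      obtain ⟨ic, hicf, hslice⟩ := List.mem_map.mp hm
      obtain ⟨hicmem, hdot⟩ := List.mem_filter.mp hicf
      obtain ⟨k, hk, hic⟩ := (PySem.List.mem_enumerate_iff _ _ _).mp hicmem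
      subst hic
      simp only [beq_iff_eq] at hdot
      have hpl : pat.toList = name.toList.take k := by
        rw [← hslice]; simp
      have hks : name.toList[k]? = some '.' := by
        rw [List.getElem?_eq_getElem hk, hdot]
      have : pat.toList ++ ['.'] = name.toList.take (k + 1) := by
        rw [List.take_add_one, hpl, hks]; rfl
      rw [this]; exact List.take_prefix _ _
    · rintro ⟨t, ht⟩
      rw [List.append_assoc] at ht
      have hk : pat.toList.length < name.toList.length := by
        have hlen' := congrArg List.length ht
        simp only [List.length_append, List.length_cons] at hlen'
        omega
      have hget? : name.toList[pat.toList.length]? = some '.' := by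
        rw [← ht, List.getElem?_append_right (le_refl _)]
        simp
      have hget : name.toList[pat.toList.length]'hk = '.' := by
        have := List.getElem?_eq_getElem hk
        rw [hget?] at this; exact (Option.some.inj this).symm
      have htake : name.toList.take pat.toList.length = pat.toList := by
        rw [← ht]; exact List.take_left
      refine List.mem_map.mpr ⟨((pat.toList.length : Int), '.'), List.mem_filter.mpr ⟨?_, by simp⟩, ?_⟩
      · refine (PySem.List.mem_enumerate_iff _ _ _).mpr ⟨pat.toList.length, hk, ?_⟩
        rw [hget]; simp
      · apply String.toList_inj.mp
        rw [slice_toList_take, htake]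
  rw [key]
  constructor
  · rintro (h | h)
    · exact Or.inr h
    · exact Or.inl h.symm
  · rintro (h | h)
    · exact Or.inr h.symm
    · exact Or.inl h

-- the ancestor keys of one name are pairwise distinct
theorem nodup_pvDottedKeys (name : String) : (pvDottedKeys name).Nodup := by
  unfold pvDottedKeys
  have hmemc : ∀ ic ∈ (PySem.List.enumerate name.toList).filter (fun ic => ic.2 == '.'),
      ∃ k : Nat, ∃ h : k < name.toList.length, ic = ((k : Int), name.toList[k]) := by
    intro ic hic
    obtain ⟨hmem, _⟩ := List.mem_filter.mp hic
    obtain ⟨k, hk, hicv⟩ := (PySem.List.mem_enumerate_iff _ _ _).mp hmem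
    exact ⟨k, hk, by rw [hicv]; simp⟩
  have hnodf : ((PySem.List.enumerate name.toList).filter (fun ic => ic.2 == '.')).Nodup := by
    refine List.Pairwise.imp ?_ (List.Pairwise.filter _ (PySem.List.pairwise_lt_enumerate name.toList 0))
    intro a b h heq
    rw [heq] at h
    exact lt_irrefl _ h
  refine List.Nodup.append ?_ (List.nodup_singleton _) ?_
  · refine List.Nodup.map_on ?_ hnodf
    intro x hx y hy hfeq
    obtain ⟨kx, hkx, hxv⟩ := hmemc x hx
    obtain ⟨ky, hky, hyv⟩ := hmemc y hy
    subst hxv; subst hyv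
    dsimp only at hfeq
    have h1 := congrArg (fun s : String => s.toList.length) hfeq
    dsimp only at h1
    rw [slice_toList_take, slice_toList_take, List.length_take, List.length_take] at h1
    have : kx = ky := by omega
    subst this
    rfl
  · intro a ha hb
    rw [List.mem_singleton] at hb
    obtain ⟨ic, hicf, hslice⟩ := List.mem_map.mp ha
    obtain ⟨k, hk, hicv⟩ := hmemc ic hicf
    subst hicv
    dsimp only at hslice
    have h1 := congrArg (fun s : String => s.toList.length) hslice
    dsimp only at h1
    rw [slice_toList_take, List.length_take, hb] at h1
    omega

-- the inner loop: appending name under each key of a distinct key list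
theorem get?_foldl_modify_append (name : String) (keys : List String) (h : keys.Nodup)
    (d : PySem.Dict String (List String)) (pat : String) :
    (keys.foldl (fun d k => d.modify k [] (fun v => v ++ [name])) d).get? pat =
      if pat ∈ keys then some (d.getD pat [] ++ [name]) else d.get? pat := by
  induction keys generalizing d with
  | nil => simp
  | cons k ks ih =>
    simp only [List.foldl_cons]
    rcases List.nodup_cons.mp h with ⟨hk, hks⟩
    by_cases hpk : pat = k
    · subst hpk
      rw [ih hks]
      simp only [List.mem_cons, true_or, if_pos, if_neg hk]
      simp [PySem.Dict.modify, PySem.Dict.get?_insert_self d pat]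
    · rw [ih hks]
      have h1 : (d.modify k [] (fun v => v ++ [name])).get? pat = d.get? pat := by
        simp only [PySem.Dict.modify]
        exact PySem.Dict.get?_insert_of_ne d _ hpk
      have h2 : (d.modify k [] (fun v => v ++ [name])).getD pat [] = d.getD pat [] := by
        simp [PySem.Dict.getD, h1]
      rw [h1, h2]
      simp [List.mem_cons, hpk]

-- the index built over tools, looked up at pat, is the filtered tool list
theorem get?_foldl_index (tools : List String) (pat : String)
    (d : PySem.Dict String (List String)) :
    (tools.foldl
      (fun d name =>
        (pvDottedKeys name).foldl (fun d k => d.modify k [] (fun v => v ++ [name])) d)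
      d).get? pat =
      match d.get? pat with
      | some v => some (v ++ tools.filter (fun n => matches_segment pat n))
      | none =>
        if (tools.filter (fun n => matches_segment pat n)) = [] then none
        else some (tools.filter (fun n => matches_segment pat n)) := by
  induction tools generalizing d with
  | nil =>
    cases hd : d.get? pat <;> simp [hd]
  | cons t ts ih =>
    simp only [List.foldl_cons, List.filter_cons]
    rw [ih]
    have hstep := get?_foldl_modify_append t (pvDottedKeys t) (nodup_pvDottedKeys t) d pat
    by_cases hm : matches_segment pat t = true
    · rw [if_pos ((mem_pvDottedKeys pat t).mpr hm)] at hstep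
      rw [hstep]
      cases hd : d.get? pat with
      | some v => simp [hd, hm, PySem.Dict.getD, List.append_assoc]
      | none => simp [hd, hm, PySem.Dict.getD]
    · rw [if_neg (fun hmem => hm ((mem_pvDottedKeys pat t).mp hmem))] at hstep
      rw [hstep]
      simp [hm]

theorem get?_pvBuildIndex (tools : List String) (pat : String) :
    (pvBuildIndex tools).get? pat =
      (if (tools.filter (fun n => matches_segment pat n)) = [] then none
       else some (tools.filter (fun n => matches_segment pat n))) := by
  unfold pvBuildIndex
  rw [get?_foldl_index]
  have : (PySem.Dict.empty : PySem.Dict String (List String)).get? pat = none := by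
    simp [pysem]
  rw [this]

theorem main_fold (tools : List String) (hN : tools.Nodup) (patterns : List String)
    (hP : ∀ pat ∈ patterns, ∃ name ∈ tools, matches_segment pat name = true)
    (m : PySem.Set String) :
    patterns.foldl
      (fun acc pat =>
        match acc with
        | none => none
        | some matched =>
          let hits : PySem.Set String :=
            PySem.Set.ofList (tools.filter (fun name => matches_segment pat name))
          if hits = [] then none
          else some (PySem.Set.union matched hits))
      (some m) =
    patterns.foldl
      (fun acc pat =>
        match acc with
        | none => none
        | some matched =>
          match (pvBuildIndex tools).get? pat with
          | none => none
          | some hits => some (PySem.Set.update matched hits))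
      (some m) := by
  induction patterns generalizing m with
  | nil => rfl
  | cons p ps ih =>
    obtain ⟨n, hn, hmn⟩ := hP p (List.mem_cons_self)
    have hfil : tools.filter (fun x => matches_segment p x) ≠ [] := by
      intro h0
      have hmem : n ∈ tools.filter (fun x => matches_segment p x) :=
        List.mem_filter.mpr ⟨hn, hmn⟩
      rw [h0] at hmem
      exact absurd hmem (List.not_mem_nil)
    have hofl : PySem.Set.ofList (tools.filter (fun x => matches_segment p x)) =
        tools.filter (fun x => matches_segment p x) :=
      PySem.Set.ofList_eq_self_of_nodup _ (hN.filter _)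
    simp only [List.foldl_cons]
    rw [hofl, if_neg hfil, get?_pvBuildIndex tools p, if_neg hfil]
    have hu : PySem.Set.union m (tools.filter (fun x => matches_segment p x)) =
        PySem.Set.update m (tools.filter (fun x => matches_segment p x)) := rfl
    rw [hu]
    exact ih (fun pat hp => hP pat (List.mem_cons_of_mem _ hp)) _

-- ===== VERDICT (by name: the statement is the Claim_ definition above) =====
theorem resolve_directly_callable_spec : Claim_equal_resolve_directly_callable := by
  intro patterns tools _ hPre
  unfold Spec_resolve_directly_callable
  unfold resolve_directly_callable resolve_directly_callable_alt
  rw [main_fold tools hPre.1 patterns hPre.2]
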